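-- pv_equiv track=rewrite | github.com/moncla-lab/h5nx-Clades | avian-flu-clademaker/Mutation_Finder.py | unique_muts
-- ===== SOURCE A (Python) =====
-- def unique_muts(HA, nuc):
--     #initializing our dictionaries to be returned
--     unique_HA = {}
--     unique_nuc = {}
--
--     for key in HA.keys(): #because we should only have 1 instance of each clade
--         unique_HA[key] = [] #we can simply initalize our list at the start
--
--         for mutation in HA[key]: #for each mutation in HA mutations
--             skip = False #initialize our skip variable for later
--             for clade in HA.keys(): #for clade in our keys
--                 if clade != key: # as long as our clade is not the key we are appending to
--                     if mutation in HA[clade]: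
--                         skip = True #if it is present we're going to skip it
--             if skip == False: #then, if skip is False, we're going to append our mutation to the list
--                 unique_HA[key].append(mutation)
--                 #the way the skip variable works is for each mutation it is by default
--                 #assigned to false, then if it is found in any other clade it is assigned to True
--                 #because we assign to false before we start going in to the check portion of the code
--                 #it will only be assigned false by default when we first find the mutation, and no other time
--
--                 #the following is the exact same code as above but for nuc rather than HA
--     for key in nuc.keys():
--         unique_nuc[key] = []
--
--         for mutation in nuc[key]:
--             skip = False
--             for clade in nuc.keys():
--                 if clade != key:
--                     if mutation in nuc[clade]:
--                         skip = True
--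
--             if skip == False:
--                 unique_nuc[key].append(mutation)
--
--     return unique_HA, unique_nuc
-- ===== SOURCE B (Python) =====
-- def unique_muts(HA, nuc):
--     # One pass builds owners: mutation -> list of clades containing it; then each
--     # clade keeps exactly the mutations owned by it alone.
--     def uniq(d):
--         owners = {}
--         for clade, muts in d.items():
--             for m in muts:
--                 lst = owners.get(m, [])
--                 if clade not in lst:
--                     owners[m] = lst + [clade]
--         return {clade: [m for m in muts if owners[m] == [clade]]
--                 for clade, muts in d.items()}
--     return uniq(HA), uniq(nuc)
-- ===== Notes on version B (the rewrite author's own statement) =====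
-- stated objective: faster
-- what changed: Replaces A's per-mutation rescan of every other clade's mutation list with a single-pass owners index (mutation -> list of clades containing it) followed by one filtering pass per clade.
import Mathlib
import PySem

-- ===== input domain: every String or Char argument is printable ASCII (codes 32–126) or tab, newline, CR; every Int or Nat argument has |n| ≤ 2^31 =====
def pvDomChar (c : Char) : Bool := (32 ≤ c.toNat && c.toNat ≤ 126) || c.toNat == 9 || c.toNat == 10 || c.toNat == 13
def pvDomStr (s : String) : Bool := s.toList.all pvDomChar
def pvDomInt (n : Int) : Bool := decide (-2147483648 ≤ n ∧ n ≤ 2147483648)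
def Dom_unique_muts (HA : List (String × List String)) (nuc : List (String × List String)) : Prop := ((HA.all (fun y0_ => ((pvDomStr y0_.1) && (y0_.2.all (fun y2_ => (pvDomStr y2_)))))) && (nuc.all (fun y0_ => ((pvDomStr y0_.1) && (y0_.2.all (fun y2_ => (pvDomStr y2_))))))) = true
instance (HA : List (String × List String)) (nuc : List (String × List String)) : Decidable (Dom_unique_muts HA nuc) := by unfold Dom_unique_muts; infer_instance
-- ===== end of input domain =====

-- B replaces A's per-mutation scan of every other clade by a single owners index
-- (mutation -> clades containing it) built in one pass; objective: faster (asymptotic).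
-- The dict arguments are marshalled as association lists and read through PySem.Dict
-- (Python dict semantics: later duplicate keys overwrite, insertion order kept).

-- ===== PORT A =====
-- literal transliteration of A's triple loop for one of the two dicts
def pvUniqOne (d : PySem.Dict String (List String)) : PySem.Dict String (List String) :=
  d.keys.foldl (fun u key =>
    (d.getD key []).foldl (fun u mutation =>
      let skip := d.keys.foldl (fun skip clade =>
        if clade ≠ key then
          (if mutation ∈ d.getD clade [] then true else skip)
        else skip) false
      if skip = false then u.modify key [] (fun l => l ++ [mutation]) else u)
      (u.insert key [])) PySem.Dict.empty

def unique_muts (HA : List (String × List String)) (nuc : List (String × List String)) : (List (String × List String)) × (List (String × List String)) :=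
  ((pvUniqOne (PySem.Dict.ofList HA)).items, (pvUniqOne (PySem.Dict.ofList nuc)).items)

-- ===== PORT B =====
-- owners: mutation -> list of clades whose mutation list contains it (one pass over the items)
def pvOwners (items : List (String × List String)) : PySem.Dict String (List String) :=
  items.foldl (fun ow p =>
    p.2.foldl (fun ow m =>
      let lst := ow.getD m []
      if p.1 ∈ lst then ow else ow.insert m (lst ++ [p.1])) ow) PySem.Dict.empty

def pvUniqOneAlt (d : PySem.Dict String (List String)) : PySem.Dict String (List String) :=
  let owners := pvOwners d.items
  PySem.Dict.ofList (d.items.map (fun p => (p.1, p.2.filter (fun m => decide (owners.getD m [] = [p.1])))))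

def unique_muts_alt (HA : List (String × List String)) (nuc : List (String × List String)) : (List (String × List String)) × (List (String × List String)) :=
  ((pvUniqOneAlt (PySem.Dict.ofList HA)).items, (pvUniqOneAlt (PySem.Dict.ofList nuc)).items)

-- ===== PRECONDITION & SPEC =====
def Spec_unique_muts (HA : List (String × List String)) (nuc : List (String × List String)) (out : (List (String × List String)) × (List (String × List String))) : Prop := out = unique_muts_alt HA nuc
instance (HA : List (String × List String)) (nuc : List (String × List String)) (out : (List (String × List String)) × (List (String × List String))) : Decidable (Spec_unique_muts HA nuc out) := by unfold Spec_unique_muts; infer_instance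

-- ===== CLAIM (what is proved, stated in full; the proofs are below) =====
def Claim_equal_unique_muts : Prop := ∀ (HA : List (String × List String)) (nuc : List (String × List String)), Dom_unique_muts HA nuc → Spec_unique_muts HA nuc (unique_muts HA nuc)

-- ===== LEMMAS AND PROOFS =====

theorem pv_skip_fold (keys : List String) (d : PySem.Dict String (List String))
    (key mutation : String) (b : Bool) :
    keys.foldl (fun skip clade =>
        if clade ≠ key then (if mutation ∈ d.getD clade [] then true else skip) else skip) b
      = (b || keys.any (fun clade => clade ≠ key && decide (mutation ∈ d.getD clade []))) := by
  induction keys generalizing b with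
  | nil => simp
  | cons c t ih =>
    simp only [List.foldl_cons, List.any_cons, ih]
    by_cases hc : c ≠ key <;> by_cases hm : mutation ∈ d.getD c [] <;>
      simp [hc, hm]

theorem pv_A_inner (muts : List String) (u : PySem.Dict String (List String))
    (key : String) (v : List String) (g : String → Bool) :
    muts.foldl (fun u m => if g m = false then u.modify key [] (fun l => l ++ [m]) else u)
        (u.insert key v)
      = u.insert key (v ++ muts.filter (fun m => !g m)) := by
  induction muts generalizing v with
  | nil => simp
  | cons m t ih =>
    simp only [List.foldl_cons, List.filter_cons]
    by_cases hg : g m = false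
    · rw [if_pos hg]
      rw [show (u.insert key v).modify key [] (fun l => l ++ [m]) = u.insert key (v ++ [m]) by
        simp [PySem.Dict.modify, PySem.Dict.getD_insert_self, PySem.Dict.insert_insert_self]]
      rw [ih]
      simp [hg]
    · rw [if_neg hg, ih]
      simp [show g m = true by revert hg; cases g m <;> simp]

theorem pv_owners_inner (muts : List String) (ow : PySem.Dict String (List String))
    (clade m : String) :
    (muts.foldl (fun ow x =>
        let lst := ow.getD x []
        if clade ∈ lst then ow else ow.insert x (lst ++ [clade])) ow).getD m []
      = if m ∈ muts ∧ clade ∉ ow.getD m [] then ow.getD m [] ++ [clade] else ow.getD m [] := by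
  induction muts generalizing ow with
  | nil => simp
  | cons x t ih =>
    simp only [List.foldl_cons]
    by_cases hx : x = m
    · subst hx
      by_cases hc : clade ∈ ow.getD x []
      · simp only [if_pos hc, ih]
        simp [hc]
      · simp only [if_neg hc, ih, PySem.Dict.getD_insert_self]
        simp [hc]
    · have hmx : m ≠ x := fun h => hx h.symm
      by_cases hc : clade ∈ ow.getD x []
      · simp only [if_pos hc, ih]
        simp [hmx]
      · simp only [if_neg hc, ih, PySem.Dict.getD_insert_of_ne ow _ [] hmx]
        simp [hmx]

theorem pv_owners_outer (l : List (String × List String)) (ow : PySem.Dict String (List String))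
    (m : String) (hnd : (l.map (·.1)).Nodup) (h : ∀ p ∈ l, p.1 ∉ ow.getD m []) :
    (l.foldl (fun ow p =>
        p.2.foldl (fun ow m =>
          let lst := ow.getD m []
          if p.1 ∈ lst then ow else ow.insert m (lst ++ [p.1])) ow) ow).getD m []
      = ow.getD m [] ++ (l.filter (fun p => decide (m ∈ p.2))).map (·.1) := by
  induction l generalizing ow with
  | nil => simp
  | cons p t ih =>
    simp only [List.map_cons, List.nodup_cons] at hnd
    have hp : p.1 ∉ ow.getD m [] := h p (List.mem_cons_self)
    simp only [List.foldl_cons, List.filter_cons]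
    -- the state after processing p
    have key : (p.2.foldl (fun ow m =>
          let lst := ow.getD m []
          if p.1 ∈ lst then ow else ow.insert m (lst ++ [p.1])) ow).getD m []
        = ow.getD m [] ++ (if m ∈ p.2 then [p.1] else []) := by
      rw [pv_owners_inner]
      by_cases hm : m ∈ p.2 <;> simp [hm, hp]
    rw [ih _ hnd.2 ?later]
    · rw [key]
      by_cases hm : m ∈ p.2 <;> simp [hm, List.append_assoc]
    case later =>
      intro q hq
      rw [key]
      have hq1 : q.1 ∉ ow.getD m [] := h q (List.mem_cons_of_mem _ hq)
      by_cases hm : m ∈ p.2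
      · simp only [if_pos hm, List.mem_append, List.mem_singleton]
        rintro (h1 | h1)
        · exact hq1 h1
        · exact hnd.1 (h1 ▸ List.mem_map_of_mem hq)
      · simpa [hm] using hq1

theorem pv_owners_getD (l : List (String × List String)) (m : String)
    (hnd : (l.map (·.1)).Nodup) :
    (pvOwners l).getD m [] = (l.filter (fun p => decide (m ∈ p.2))).map (·.1) := by
  unfold pvOwners
  rw [pv_owners_outer l PySem.Dict.empty m hnd (by simp [PySem.Dict.getD_empty])]
  simp [PySem.Dict.getD_empty]

theorem pv_filter_singleton {α : Type} [DecidableEq α] (keys : List α) (key : α) (q : α → Bool)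
    (hnd : keys.Nodup) (hmem : key ∈ keys) (hq : q key = true) :
    keys.filter q = [key] ↔ ∀ c ∈ keys, c ≠ key → q c = false := by
  induction keys with
  | nil => simp at hmem
  | cons a t ih =>
    simp only [List.nodup_cons] at hnd
    rcases List.mem_cons.mp hmem with h | h
    · subst h
      rw [List.filter_cons_of_pos hq]
      constructor
      · rintro hf c hc hne
        have ht : t.filter q = [] := by simpa using hf
        rcases List.mem_cons.mp hc with rfl | hc
        · exact absurd rfl hne
        · exact Bool.not_eq_true _ ▸ (List.filter_eq_nil_iff.mp ht c hc)
      · intro hall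
        have : t.filter q = [] := List.filter_eq_nil_iff.mpr
          (fun c hc => by simpa using hall c (List.mem_cons_of_mem _ hc) (fun hEq => hnd.1 (hEq ▸ hc)))
        simp [this]
    · have hak : a ≠ key := fun hEq => hnd.1 (hEq ▸ h)
      by_cases hqa : q a = true
      · rw [List.filter_cons_of_pos hqa]
        constructor
        · intro hf
          have : a = key := by simpa using congrArg (·.head?) hf
          exact absurd this hak
        · intro hall
          exact absurd (hall a List.mem_cons_self hak) (by simp [hqa])
      · rw [List.filter_cons_of_neg hqa]
        rw [ih hnd.2 h]
        constructor
        · rintro hall c hc hne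
          rcases List.mem_cons.mp hc with rfl | hc
          · simpa using hqa
          · exact hall c hc hne
        · intro hall c hc hne
          exact hall c (List.mem_cons_of_mem _ hc) hne

theorem pv_items_ofList (ps : List (String × List String)) (hnd : (ps.map (·.1)).Nodup) :
    (PySem.Dict.ofList ps).items = ps := by
  show (ps.foldl (fun acc p => acc.insert p.1 p.2) PySem.Dict.empty).items = ps
  rw [PySem.Dict.items_foldl_insert_fresh ps (·.1) (·.2) PySem.Dict.empty
    (fun a _ => PySem.Dict.contains_empty _) hnd]
  simp [PySem.Dict.empty]

theorem pv_uniq_eq (d : PySem.Dict String (List String)) (hnd : d.keys.Nodup) :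
    pvUniqOne d = pvUniqOneAlt d := by
  have hitems : d.items.map (·.1) = d.keys := rfl
  -- A side
  have hA : (pvUniqOne d).items = d.keys.map (fun key => (key,
      (d.getD key []).filter (fun m =>
        !(d.keys.any (fun clade => clade ≠ key && decide (m ∈ d.getD clade [])))))) := by
    unfold pvUniqOne
    have hbody : (fun (u : PySem.Dict String (List String)) key =>
        (d.getD key []).foldl (fun u mutation =>
          let skip := d.keys.foldl (fun skip clade =>
            if clade ≠ key then
              (if mutation ∈ d.getD clade [] then true else skip)
            else skip) false
          if skip = false then u.modify key [] (fun l => l ++ [mutation]) else u)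
          (u.insert key []))
        = (fun u key => u.insert key ([] ++ (d.getD key []).filter (fun m =>
            !(d.keys.foldl (fun skip clade =>
                if clade ≠ key then
                  (if m ∈ d.getD clade [] then true else skip)
                else skip) false)))) := by
      funext u key
      exact pv_A_inner (d.getD key []) u key [] _
    rw [hbody]
    rw [PySem.Dict.items_foldl_insert_fresh d.keys (fun key => key) _ PySem.Dict.empty
      (fun a _ => PySem.Dict.contains_empty _) (by simpa using hnd)]
    simp only [PySem.Dict.empty, List.nil_append]
    apply List.map_congr_left
    intro key _
    refine congrArg _ (List.filter_congr ?_)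
    intro m _
    rw [pv_skip_fold]
    simp
  -- B side
  have hndl : (d.items.map (·.1)).Nodup := hitems ▸ hnd
  have hB : (pvUniqOneAlt d).items = d.items.map (fun p => (p.1,
      p.2.filter (fun m => decide ((pvOwners d.items).getD m [] = [p.1])))) := by
    unfold pvUniqOneAlt
    apply pv_items_ofList
    simpa [List.map_map, Function.comp] using hndl
  have hOW : ∀ m : String, (pvOwners d.items).getD m []
      = d.keys.filter (fun c => decide (m ∈ d.getD c [])) := by
    intro m
    rw [pv_owners_getD d.items m hndl]
    rw [PySem.Dict.items_eq_map_keys d hnd []]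
    rw [List.filter_map, List.map_map]
    simp only [Function.comp_def]
    exact List.map_id _
  apply PySem.Dict.ext
  rw [hA, hB]
  simp only [hOW]
  rw [PySem.Dict.items_eq_map_keys d hnd [], List.map_map]
  apply List.map_congr_left
  intro key hkey
  simp only [Function.comp]
  refine congrArg _ (List.filter_congr ?_)
  intro m hm
  have hq : (decide (m ∈ d.getD key []) : Bool) = true := by simpa using hm
  have howners := hOW m
  have hiff := pv_filter_singleton d.keys key (fun c => decide (m ∈ d.getD c [])) hnd hkey hq
  by_cases hP : ∀ c ∈ d.keys, c ≠ key → (decide (m ∈ d.getD c []) : Bool) = false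
  · have h1 := hiff.mpr hP
    have h2 : d.keys.any (fun c => c ≠ key && decide (m ∈ d.getD c [])) = false := by
      simp only [List.any_eq_false]
      intro c hc
      by_cases hck : c = key
      · simp [hck]
      · simp [hck, hP c hc hck]
    rw [h2, h1]
    simp
  · have h1 : ¬ d.keys.filter (fun c => decide (m ∈ d.getD c [])) = [key] :=
      fun h => hP (hiff.mp h)
    have h2 : d.keys.any (fun c => c ≠ key && decide (m ∈ d.getD c [])) = true := by
      push Not at hP
      obtain ⟨c, hc, hck, hqc⟩ := hP
      refine List.any_eq_true.mpr ⟨c, hc, ?_⟩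
      simp only [Bool.not_eq_false] at hqc
      simp [hck, hqc]
    rw [h2]
    simp [h1]

-- ===== VERDICT (by name: the statement is the Claim_ definition above) =====
theorem unique_muts_spec : Claim_equal_unique_muts := by
  intro HA nuc _
  show _ = _
  unfold unique_muts unique_muts_alt
  rw [pv_uniq_eq _ (PySem.Dict.nodup_keys_ofList HA), pv_uniq_eq _ (PySem.Dict.nodup_keys_ofList nuc)]
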